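-- pv_equiv track=rewrite | github.com/ScrappinR/MWRASP-Quantum-Defense | MWRASP_REVOLUTIONARY_PROTOCOL_ORDER_AUTH.py | _fibonacci_shuffle
-- ===== SOURCE A (Python) =====
-- from typing import Dict, List, Optional, Tuple, Any, Set
--
-- def _fibonacci_shuffle(protocols: List[str]) -> List[str]:
--     """
--     Reorder using Fibonacci sequence positions
--     NOVEL - Mathematical pattern unique to agent
--     """
--     fib = [1, 1]
--     while len(fib) < len(protocols):
--         fib.append(fib[-1] + fib[-2])
--
--     shuffled = []
--     remaining = protocols.copy()
--
--     for f in fib[:len(protocols)]: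
--         if remaining:
--             index = f % len(remaining)
--             shuffled.append(remaining.pop(index))
--
--     # Add any remaining protocols
--     shuffled.extend(remaining)
--
--     return shuffled[:len(protocols)]
-- ===== SOURCE B (Python) =====
-- def _fib_pair(k, m):
--     # (F(k) % m, F(k+1) % m) by fast doubling; m >= 1
--     if k <= 0:
--         return (0, 1 % m)
--     a, b = _fib_pair(k // 2, m)
--     c = a * (2 * b - a) % m
--     d = (a * a + b * b) % m
--     if k % 2 == 1:
--         return (d, (c + d) % m)
--     return (c, d)
--
--
-- def _build(xs):
--     # counted segment tree over a nonempty list; leaf = (alive, s), node = (live_count, left, right)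
--     if len(xs) == 1:
--         return (True, xs[0])
--     m = len(xs) // 2
--     return (len(xs), _build(xs[:m]), _build(xs[m:]))
--
--
-- def _cnt(t):
--     return (1 if t[0] else 0) if len(t) == 2 else t[0]
--
--
-- def _kill(t, j):
--     # select the j-th live leaf, return (its string, tree with it dead); None if out of range
--     if len(t) == 2:
--         alive, s = t
--         if alive and j == 0:
--             return (s, (False, s))
--         return None
--     c, l, r = t
--     cl = _cnt(l)
--     if j < cl:
--         res = _kill(l, j)
--         if res is None:
--             return None
--         s, l2 = res
--         return (s, (c - 1, l2, r))
--     res = _kill(r, j - cl)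
--     if res is None:
--         return None
--     s, r2 = res
--     return (s, (c - 1, l, r2))
--
--
-- def _fibonacci_shuffle(protocols):
--     if not protocols:
--         return []
--     n = len(protocols)
--     t = _build(protocols)
--     out = []
--     for i in range(n):
--         m = n - i
--         j = _fib_pair(i + 1, m)[0]
--         s, t = _kill(t, j)
--         out.append(s)
--     return out
-- ===== Notes on version B (the rewrite author's own statement) =====
-- stated objective: alternative
-- what changed: Replaces the big-integer Fibonacci list plus repeated list.pop with fast-doubling Fibonacci computed modulo the live count and a counted segment tree doing select-and-delete of the k-th remaining element; asymptotically lighter (O(n log^2 n) vs O(n^2)) but Python constant factors left a timing run at only 1.2x at the largest size both finished, so no speed is claimed.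
import Mathlib
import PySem

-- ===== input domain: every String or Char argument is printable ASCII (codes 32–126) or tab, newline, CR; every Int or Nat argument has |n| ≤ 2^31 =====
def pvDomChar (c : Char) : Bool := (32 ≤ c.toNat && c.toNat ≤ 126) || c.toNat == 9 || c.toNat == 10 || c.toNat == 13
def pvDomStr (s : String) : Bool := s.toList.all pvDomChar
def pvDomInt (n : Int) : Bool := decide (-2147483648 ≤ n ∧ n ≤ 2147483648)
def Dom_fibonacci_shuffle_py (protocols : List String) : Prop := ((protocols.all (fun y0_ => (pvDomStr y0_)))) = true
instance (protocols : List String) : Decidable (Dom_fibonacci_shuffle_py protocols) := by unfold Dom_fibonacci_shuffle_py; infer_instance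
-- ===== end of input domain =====

-- B replaces A's big-integer Fibonacci list and repeated list.pop with fast-doubling
-- Fibonacci mod the live count plus a counted segment tree (select-and-delete); objective: alternative.

-- ===== PORT A =====

-- while len(fib) < len(protocols): fib.append(fib[-1] + fib[-2])
-- (fib always has length ≥ 2, so fib[-1]/fib[-2] are in range; pyGetD's default is dead)
def pvBuildFib (n : Nat) (fib : List Int) : List Int :=
  if fib.length < n then
    pvBuildFib n (fib ++ [PySem.List.pyGetD fib (-1) 0 + PySem.List.pyGetD fib (-2) 0])
  else fib
termination_by n - fib.length
decreasing_by simp; omega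

-- one iteration of A's for-loop body over state (shuffled, remaining)
def pvStepA (s : List String × List String) (f : Int) : List String × List String :=
  if s.2.isEmpty then s
  else
    let index := PySem.Int.mod f (s.2.length : Int)
    match PySem.List.pop? s.2 index with
    | some (x, r) => (s.1 ++ [x], r)
    | none => s   -- list.pop raises only out of range; index = f % len is always in range

def fibonacci_shuffle_py (protocols : List String) : List String :=
  let fib := pvBuildFib protocols.length [1, 1]
  let s := List.foldl pvStepA ([], protocols) (PySem.List.slice fib none (some (protocols.length : Int)))
  PySem.List.slice (s.1 ++ s.2) none (some (protocols.length : Int))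

-- ===== PORT B =====

-- (F(k) % m, F(k+1) % m) by fast doubling, m ≥ 1
def pvFibPair (k : Int) (m : Int) : Int × Int :=
  if _h : k ≤ 0 then (0, PySem.Int.mod 1 m)
  else
    let p := pvFibPair (PySem.Int.floordiv k 2) m
    let a := p.1
    let b := p.2
    let c := PySem.Int.mod (a * (2 * b - a)) m
    let d := PySem.Int.mod (a * a + b * b) m
    if PySem.Int.mod k 2 = 1 then (d, PySem.Int.mod (c + d) m) else (c, d)
termination_by k.toNat
decreasing_by
  rw [PySem.Int.floordiv_eq_ediv_of_pos (by omega : (0:Int) < 2)]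
  omega

-- counted segment tree: leaf (alive, s), node (live count, left, right)
inductive PVTree : Type
  | leaf : Bool → String → PVTree
  | node : Nat → PVTree → PVTree → PVTree

def pvCnt : PVTree → Nat
  | .leaf alive _ => if alive then 1 else 0
  | .node c _ _ => c

-- select the j-th live leaf and mark it dead; none if out of range (never hit by B)
def pvKill : PVTree → Int → Option (String × PVTree)
  | .leaf alive s, j => if alive ∧ j = 0 then some (s, .leaf false s) else none
  | .node c l r, j =>
    let cl := pvCnt l
    if j < (cl : Int) then
      match pvKill l j with
      | some (s, l2) => some (s, .node (c - 1) l2 r)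
      | none => none
    else
      match pvKill r (j - (cl : Int)) with
      | some (s, r2) => some (s, .node (c - 1) l r2)
      | none => none

-- _build: Python only calls it on nonempty lists; the [] branch is unreachable
def pvBuild (xs : List String) : PVTree :=
  if h1 : xs.length = 1 then .leaf true (xs.headD "")
  else if h2 : xs.length ≤ 1 then .leaf false ""
  else .node xs.length (pvBuild (xs.take (xs.length / 2))) (pvBuild (xs.drop (xs.length / 2)))
termination_by xs.length
decreasing_by all_goals simp; omega

-- one iteration of B's for-loop body over state (out, tree)
def pvStepB (n : Nat) (s : List String × PVTree) (i : Int) : List String × PVTree :=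
  let m : Int := (n : Int) - i
  let j := (pvFibPair (i + 1) m).1
  match pvKill s.2 j with
  | some (x, t2) => (s.1 ++ [x], t2)
  | none => s   -- unreachable: j = F(i+1) % m is a valid rank

def fibonacci_shuffle_py_alt (protocols : List String) : List String :=
  if protocols.isEmpty then []
  else (List.foldl (pvStepB protocols.length) ([], pvBuild protocols)
        (PySem.List.pyRange 0 (protocols.length : Int) 1)).1

-- ===== PRECONDITION & SPEC =====
def Spec_fibonacci_shuffle_py (protocols : List String) (out : List String) : Prop := out = fibonacci_shuffle_py_alt protocols
instance (protocols : List String) (out : List String) : Decidable (Spec_fibonacci_shuffle_py protocols out) := by unfold Spec_fibonacci_shuffle_py; infer_instance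

-- ===== CLAIM (what is proved, stated in full; the proofs are below) =====
def Claim_equal_fibonacci_shuffle_py : Prop := ∀ (protocols : List String), Dom_fibonacci_shuffle_py protocols → Spec_fibonacci_shuffle_py protocols (fibonacci_shuffle_py protocols)

-- ===== LEMMAS AND PROOFS =====

-- the list of strings at the live leaves, left to right
def pvLive : PVTree → List String
  | .leaf alive s => if alive then [s] else []
  | .node _ l r => pvLive l ++ pvLive r

-- every node's stored count is the number of live leaves below it
def pvInv : PVTree → Prop
  | .leaf _ _ => True
  | .node c l r => c = (pvLive l).length + (pvLive r).length ∧ pvInv l ∧ pvInv r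

lemma pvCnt_eq {t : PVTree} (h : pvInv t) : pvCnt t = (pvLive t).length := by
  cases t with
  | leaf alive s => cases alive <;> simp [pvCnt, pvLive]
  | node c l r => obtain ⟨hc, _, _⟩ := h; simp [pvCnt, pvLive, hc]

lemma pvKill_spec {t : PVTree} (h : pvInv t) (j : Nat) (hj : j < (pvLive t).length) :
    ∃ t2, pvKill t (j : Int) = some ((pvLive t)[j], t2) ∧
      pvLive t2 = (pvLive t).eraseIdx j ∧ pvInv t2 := by
  induction t generalizing j with
  | leaf alive s =>
    cases alive with
    | false => simp [pvLive] at hj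
    | true =>
      simp [pvLive] at hj ⊢
      subst hj
      exact ⟨.leaf false s, by simp [pvKill, pvLive, pvInv]⟩
  | node c l r ihl ihr =>
    obtain ⟨hc, hl, hr⟩ := h
    have hcl : pvCnt l = (pvLive l).length := pvCnt_eq hl
    by_cases hlt : j < (pvLive l).length
    · obtain ⟨l2, hk, hlive, hinv⟩ := ihl hl j hlt
      refine ⟨.node (c - 1) l2 r, ?_, ?_, ?_⟩
      · simp only [pvKill, hcl]
        rw [if_pos (by omega)]
        rw [hk]
        simp [pvLive, List.getElem_append_left hlt]
      · simp [pvLive, hlive, List.eraseIdx_append_of_lt_length hlt]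
      · refine ⟨?_, hinv, hr⟩
        rw [hlive, List.length_eraseIdx_of_lt hlt]
        omega
    · rw [not_lt] at hlt
      have hj2 : j - (pvLive l).length < (pvLive r).length := by
        simp [pvLive] at hj; omega
      obtain ⟨r2, hk, hlive, hinv⟩ := ihr hr (j - (pvLive l).length) hj2
      refine ⟨.node (c - 1) l r2, ?_, ?_, ?_⟩
      · simp only [pvKill, hcl]
        rw [if_neg (by omega)]
        have : (j : Int) - ((pvLive l).length : Int) = ((j - (pvLive l).length : Nat) : Int) := by omega
        rw [this, hk]
        simp only [pvLive]
        rw [List.getElem_append_right hlt]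
      · simp [pvLive, hlive]
        rw [List.eraseIdx_append_of_length_le hlt]
      · refine ⟨?_, hl, hinv⟩
        rw [hlive, List.length_eraseIdx_of_lt hj2]
        omega

lemma pvBuild_spec (xs : List String) : pvLive (pvBuild xs) = xs ∧ pvInv (pvBuild xs) := by
  induction xs using pvBuild.induct with
  | case1 xs h1 =>
    match xs, h1 with
    | [s], _ => rw [pvBuild]; simp [pvLive, pvInv]
  | case2 xs h1 h2 =>
    have hx : xs = [] := by
      cases xs with
      | nil => rfl
      | cons a t =>
        cases t with
        | nil => simp at h1
        | cons b u => simp at h2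
    subst hx
    rw [pvBuild]; simp [pvLive, pvInv]
  | case3 xs h1 h2 ih1 ih2 =>
    rw [pvBuild]
    rw [dif_neg h1, dif_neg h2]
    obtain ⟨e1, i1⟩ := ih1
    obtain ⟨e2, i2⟩ := ih2
    refine ⟨?_, ?_, i1, i2⟩
    · simp [pvLive, e1, e2]
    · simp [e1, e2]
      omega

lemma pvFibPair_spec (m : Int) (hm : 0 < m) (k : Nat) :
    pvFibPair (k : Int) m = ((Nat.fib k : Int) % m, (Nat.fib (k + 1) : Int) % m) := by
  induction k using Nat.strong_induction_on with
  | _ k ih =>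
  rw [pvFibPair]
  by_cases hk : k = 0
  · subst hk
    rw [dif_pos (by omega)]
    simp [PySem.Int.mod_eq_emod_of_pos hm, Nat.fib]
  · rw [dif_neg (by omega : ¬ ((k : Int) ≤ 0))]
    have hfd : PySem.Int.floordiv (k : Int) 2 = ((k / 2 : Nat) : Int) := by
      exact_mod_cast PySem.Int.floordiv_natCast k 2
    rw [hfd, ih (k / 2) (by omega)]
    have hmod2 : PySem.Int.mod (k : Int) 2 = ((k % 2 : Nat) : Int) := by
      exact_mod_cast PySem.Int.mod_natCast k 2
    simp only [PySem.Int.mod_eq_emod_of_pos hm, hmod2]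
    have hle : Nat.fib (k / 2) ≤ 2 * Nat.fib (k / 2 + 1) := by
      have := Nat.fib_le_fib_succ (n := k / 2); omega
    have hfib2 : ((Nat.fib (2 * (k / 2)) : Int))
        = (Nat.fib (k / 2) : Int) * (2 * (Nat.fib (k / 2 + 1) : Int) - (Nat.fib (k / 2) : Int)) := by
      have h1 := Nat.fib_two_mul (k / 2)
      push_cast [h1, Nat.cast_sub hle]
      ring
    have hfib21 : ((Nat.fib (2 * (k / 2) + 1) : Int))
        = (Nat.fib (k / 2) : Int) * (Nat.fib (k / 2) : Int)
          + (Nat.fib (k / 2 + 1) : Int) * (Nat.fib (k / 2 + 1) : Int) := by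
      have h1 := Nat.fib_two_mul_add_one (k / 2)
      push_cast [h1]
      ring
    have hx : (Nat.fib (k / 2) : Int) % m ≡ (Nat.fib (k / 2) : Int) [ZMOD m] :=
      Int.emod_emod_of_dvd _ dvd_rfl
    have hy : (Nat.fib (k / 2 + 1) : Int) % m ≡ (Nat.fib (k / 2 + 1) : Int) [ZMOD m] :=
      Int.emod_emod_of_dvd _ dvd_rfl
    have hc : ((Nat.fib (k / 2) : Int) % m
          * (2 * ((Nat.fib (k / 2 + 1) : Int) % m) - (Nat.fib (k / 2) : Int) % m)) % m
        = (Nat.fib (2 * (k / 2)) : Int) % m := by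
      rw [hfib2]
      exact hx.mul ((Int.ModEq.mul_left 2 hy).sub hx)
    have hd : ((Nat.fib (k / 2) : Int) % m * ((Nat.fib (k / 2) : Int) % m)
          + (Nat.fib (k / 2 + 1) : Int) % m * ((Nat.fib (k / 2 + 1) : Int) % m)) % m
        = (Nat.fib (2 * (k / 2) + 1) : Int) % m := by
      rw [hfib21]
      exact (hx.mul hx).add (hy.mul hy)
    by_cases hpar : k % 2 = 1
    · rw [if_pos (by rw [hpar]; norm_num)]
      have hk2 : k = 2 * (k / 2) + 1 := by omega
      have hsum : ((Nat.fib (2 * (k / 2)) : Int) % m + (Nat.fib (2 * (k / 2) + 1) : Int) % m) % m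
          = (Nat.fib (2 * (k / 2) + 2) : Int) % m := by
        rw [← Int.add_emod]
        congr 1
        have := Nat.fib_add_two (n := 2 * (k / 2))
        push_cast [this]
        ring
      rw [hc, hd, hsum]
      rw [show k + 1 = 2 * (k / 2) + 2 by omega]
      conv_lhs => rw [show 2 * (k / 2) + 1 = k by omega]
    · rw [if_neg (by omega : ¬ ((k % 2 : Nat) : Int) = 1)]
      have hk2 : k = 2 * (k / 2) := by omega
      rw [hc, hd]
      rw [show 2 * (k / 2) + 1 = k + 1 by omega]
      conv_lhs => rw [show 2 * (k / 2) = k by omega]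

def pvFibList (L : Nat) : List Int := (List.range L).map (fun i => ((Nat.fib (i + 1) : Nat) : Int))

lemma pvBuildFib_spec (n L : Nat) (hL : 2 ≤ L) : pvBuildFib n (pvFibList L) = pvFibList (max L n) := by
  rw [pvBuildFib]
  have hlen : (pvFibList L).length = L := by simp [pvFibList]
  by_cases hlt : L < n
  · rw [if_pos (by rw [hlen]; exact hlt)]
    have hget1 : PySem.List.pyGetD (pvFibList L) (-1) 0 = ((Nat.fib L : Nat) : Int) := by
      rw [PySem.List.pyGetD_neg_ofNat (pvFibList L) 1 0 (by omega) (by omega)]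
      simp only [pvFibList]
      rw [List.getElem_map, List.getElem_range]
      congr 2
      simp [pvFibList] at hlen ⊢
      omega
    have hget2 : PySem.List.pyGetD (pvFibList L) (-2) 0 = ((Nat.fib (L - 1) : Nat) : Int) := by
      rw [PySem.List.pyGetD_neg_ofNat (pvFibList L) 2 0 (by omega) (by omega)]
      simp only [pvFibList]
      rw [List.getElem_map, List.getElem_range]
      congr 2
      simp [pvFibList] at hlen ⊢
      omega
    have hfib : Nat.fib (L + 1) = Nat.fib L + Nat.fib (L - 1) := by
      have h2 := Nat.fib_add_two (n := L - 1)
      rw [show L - 1 + 2 = L + 1 by omega, show L - 1 + 1 = L by omega] at h2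
      omega
    have happ : pvFibList L ++ [PySem.List.pyGetD (pvFibList L) (-1) 0 + PySem.List.pyGetD (pvFibList L) (-2) 0]
        = pvFibList (L + 1) := by
      rw [hget1, hget2]
      simp only [pvFibList, List.range_succ, List.map_append, List.map_cons, List.map_nil]
      congr 2
      rw [hfib]
      push_cast
      ring
    rw [happ, pvBuildFib_spec n (L + 1) (by omega)]
    congr 1
    omega
  · rw [if_neg (by rw [hlen]; exact hlt)]
    congr 1
    omega
termination_by n - L

lemma pvLoop_eq (n : Nat) : ∀ (k i : Nat) (acc : List String) (t : PVTree),
    pvInv t → (pvLive t).length = k → i + k = n →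
    (List.foldl pvStepA (acc, pvLive t)
        ((List.range' i k).map (fun idx => ((Nat.fib (idx + 1) : Nat) : Int)))).1
      = (List.foldl (pvStepB n) (acc, t) (PySem.List.pyRange (i : Int) (n : Int) 1)).1 ∧
    (List.foldl pvStepA (acc, pvLive t)
        ((List.range' i k).map (fun idx => ((Nat.fib (idx + 1) : Nat) : Int)))).2 = [] ∧
    (List.foldl pvStepA (acc, pvLive t)
        ((List.range' i k).map (fun idx => ((Nat.fib (idx + 1) : Nat) : Int)))).1.length
      = acc.length + k := by
  intro k
  induction k with
  | zero =>
    intro i acc t hinv hlen hik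
    have hnil : pvLive t = [] := List.eq_nil_of_length_eq_zero hlen
    have hrange : PySem.List.pyRange (i : Int) (n : Int) 1 = [] :=
      PySem.List.pyRange_one_eq_nil (by omega)
    simp [hnil, hrange]
  | succ k ihk =>
    intro i acc t hinv hlen hik
    -- peel one iteration off each fold
    rw [List.range'_succ, List.map_cons, List.foldl_cons]
    rw [PySem.List.pyRange_one_cons (by omega : (i : Int) < (n : Int)), List.foldl_cons]
    -- the common pop rank
    set rem := pvLive t with hrem
    set j : Nat := Nat.fib (i + 1) % (k + 1) with hj
    have hjlt : j < k + 1 := Nat.mod_lt _ (by omega)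
    have hjlt' : j < rem.length := by omega
    -- A's step
    have hstepA : pvStepA (acc, rem) ((Nat.fib (i + 1) : Nat) : Int)
        = (acc ++ [rem[j]], rem.eraseIdx j) := by
      simp only [pvStepA]
      rw [if_neg (by simp [List.isEmpty_iff]; intro h; rw [h] at hlen; simp at hlen)]
      have hmod : PySem.Int.mod ((Nat.fib (i + 1) : Nat) : Int) ((rem.length : Nat) : Int)
          = (j : Int) := by
        rw [hrem] at hlen ⊢
        rw [hlen]
        exact_mod_cast PySem.Int.mod_natCast (Nat.fib (i + 1)) (k + 1)
      simp only [hmod]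
      rw [PySem.List.pop?_natCast rem j hjlt']
    -- B's step
    obtain ⟨t2, hkill, hlive2, hinv2⟩ := pvKill_spec hinv j hjlt'
    have hstepB : pvStepB n (acc, t) (i : Int) = (acc ++ [rem[j]], t2) := by
      simp only [pvStepB]
      have hm : (n : Int) - (i : Int) = ((k + 1 : Nat) : Int) := by omega
      have hki : ((i : Int) + 1) = ((i + 1 : Nat) : Int) := by omega
      rw [hm, hki, pvFibPair_spec _ (by exact_mod_cast Nat.succ_pos k) (i + 1)]
      have hfst : ((Nat.fib (i + 1) : Int) % ((k + 1 : Nat) : Int)) = (j : Int) := by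
        rw [hj]
        exact (Int.natCast_mod _ _).symm
      simp only [hfst]
      rw [hkill]
    rw [hstepA, hstepB]
    have hlen2 : (pvLive t2).length = k := by
      rw [hlive2, List.length_eraseIdx_of_lt hjlt']
      omega
    have hik2 : (i + 1) + k = n := by omega
    have := ihk (i + 1) (acc ++ [rem[j]]) t2 hinv2 hlen2 hik2
    rw [hlive2] at this
    have hcast : ((i : Int) + 1) = ((i + 1 : Nat) : Int) := by omega
    rw [hcast]
    refine ⟨this.1, this.2.1, ?_⟩
    rw [this.2.2]
    simp
    omega

-- ===== VERDICT (by name: the statement is the Claim_ definition above) =====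
lemma pvInit : ([1, 1] : List Int) = pvFibList 2 := by
  simp [pvFibList, List.range_succ, Nat.fib]

theorem fibonacci_shuffle_py_spec : Claim_equal_fibonacci_shuffle_py := by
  intro ps _hdom
  unfold Spec_fibonacci_shuffle_py
  simp only [fibonacci_shuffle_py, fibonacci_shuffle_py_alt]
  by_cases hps : ps = []
  · subst hps
    simp [pvInit, pvBuildFib_spec, PySem.List.slice_to]
  · rw [if_neg (by simpa [List.isEmpty_iff] using hps)]
    have hn : 1 ≤ ps.length := by
      cases ps with
      | nil => exact absurd rfl hps
      | cons a t => simp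
    -- A's fib list is the first n Fibonacci numbers
    have hfib : PySem.List.slice (pvBuildFib ps.length [1, 1]) none (some (ps.length : Int))
        = (List.range' 0 ps.length).map (fun idx => ((Nat.fib (idx + 1) : Nat) : Int)) := by
      rw [pvInit, pvBuildFib_spec ps.length 2 (by omega)]
      rw [PySem.List.slice_to_natCast]
      simp only [pvFibList]
      rw [← List.map_take, List.take_range]
      rw [show min ps.length (max 2 ps.length) = ps.length by omega]
      rw [List.range_eq_range']
    obtain ⟨hb, hinvb⟩ := pvBuild_spec ps
    have hloop := pvLoop_eq ps.length ps.length 0 [] (pvBuild ps) hinvb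
      (by rw [hb]) (by omega)
    rw [hb] at hloop
    rw [hfib]
    obtain ⟨h1, h2, h3⟩ := hloop
    rw [h2, List.append_nil, PySem.List.slice_to_natCast]
    have h4 : (List.foldl pvStepA ([], ps)
        ((List.range' 0 ps.length).map (fun idx => ((Nat.fib (idx + 1) : Nat) : Int)))).1.length
        = ps.length := by simpa using h3
    rw [List.take_of_length_le (le_of_eq h4)]
    exact_mod_cast h1
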